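-- pv_equiv track=rewrite | github.com/happysun7080/CodingTest | COS PRO/1급_2차_문제06_로봇을_움직여주세요.py | solution
-- ===== SOURCE A (Python) =====
-- def solution(commands):
-- 	answer = [0, 0]
-- 	ways = {
-- 		"L": (-1, 0),
-- 		"R": (1, 0),
-- 		"U": (0, 1),
-- 		"D": (0, -1),
-- 	}
--
-- 	for command in commands:
-- 		for i in range(2):
-- 			answer[i] += ways[command][i]
--
-- 	return answer
-- ===== SOURCE B (Python) =====
-- def solution(commands):
--     ways = {
--         "L": (-1, 0),
--         "R": (1, 0),
--         "U": (0, 1),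
--         "D": (0, -1),
--     }
--     if not commands:
--         return [0, 0]
--     if len(commands) == 1:
--         dx, dy = ways[commands[0]]
--         return [dx, dy]
--     mid = len(commands) // 2
--     left = solution(commands[:mid])
--     right = solution(commands[mid:])
--     return [left[0] + right[0], left[1] + right[1]]
-- ===== Notes on version B (the rewrite author's own statement) =====
-- stated objective: alternative
-- what changed: B replaces A's sequential command-by-command stepping of the position with a divide-and-conquer recursion: split the command list in half, solve each half, add the two displacements (correct because net displacement is a sum, hence associatively splittable).
import Mathlib
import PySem

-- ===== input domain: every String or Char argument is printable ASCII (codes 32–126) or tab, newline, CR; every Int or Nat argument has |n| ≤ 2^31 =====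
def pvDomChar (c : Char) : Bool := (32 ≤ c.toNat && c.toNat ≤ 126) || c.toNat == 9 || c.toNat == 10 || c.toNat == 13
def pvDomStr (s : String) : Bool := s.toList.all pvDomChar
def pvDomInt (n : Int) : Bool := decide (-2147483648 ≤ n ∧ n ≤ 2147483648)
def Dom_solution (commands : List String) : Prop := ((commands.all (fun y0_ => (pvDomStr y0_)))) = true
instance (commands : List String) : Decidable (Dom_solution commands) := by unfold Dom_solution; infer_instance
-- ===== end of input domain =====

-- B replaces A's sequential position stepping by a divide-and-conquer recursion on the command
-- list (no speed claim: same O(n) cost, a genuinely different decomposition).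

-- ===== PORT A =====
-- the 'ways' dict of A
def waysA : PySem.Dict String (Int × Int) :=
  PySem.Dict.ofList [("L", ((-1 : Int), (0 : Int))), ("R", (1, 0)), ("U", (0, 1)), ("D", (0, -1))]

-- 'for command in commands: for i in range(2): answer[i] += ways[command][i]';
-- the inner range(2) loop is unrolled into the two component updates of the answer pair.
-- ways[command] raises KeyError for unknown commands — those inputs are excluded by Pre_;
-- inside Pre_ the getD default is never reached.
def solution (commands : List String) : List Int :=
  let answer :=
    commands.foldl
      (fun (answer : Int × Int) command =>
        let w := PySem.Dict.getD waysA command (0, 0)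
        (answer.1 + w.1, answer.2 + w.2))
      (0, 0)
  [answer.1, answer.2]

-- ===== PORT B =====
-- B's own 'ways' dict
def waysB : PySem.Dict String (Int × Int) :=
  PySem.Dict.ofList [("L", ((-1 : Int), (0 : Int))), ("R", (1, 0)), ("U", (0, 1)), ("D", (0, -1))]

-- divide and conquer: empty → [0,0]; single command → its unit vector (ways[commands[0]]
-- raises KeyError outside Pre_, ported with getD whose default is never reached inside Pre_,
-- and commands[0] with pyGetD, in range here); else split at mid = len//2, recurse, add.
def solution_alt (commands : List String) : List Int :=
  if h0 : commands = [] then [0, 0]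
  else if h1 : commands.length = 1 then
    let w := PySem.Dict.getD waysB (PySem.List.pyGetD commands 0 "") (0, 0)
    [w.1, w.2]
  else
    let mid : Nat := commands.length / 2
    let left := solution_alt (PySem.List.slice commands none (some (mid : Int)))
    let right := solution_alt (PySem.List.slice commands (some (mid : Int)) none)
    [PySem.List.pyGetD left 0 0 + PySem.List.pyGetD right 0 0,
     PySem.List.pyGetD left 1 0 + PySem.List.pyGetD right 1 0]
termination_by commands.length
decreasing_by
  all_goals
    simp only [PySem.List.slice_to_natCast, PySem.List.slice_from_natCast,
               List.length_take, List.length_drop]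
    have : commands.length ≠ 0 := fun hh => h0 (List.eq_nil_of_length_eq_zero hh)
    omega

-- ===== PRECONDITION & SPEC =====
-- A raises KeyError on any command outside {L,R,U,D} (and so does B); Pre_ excludes exactly those inputs.
def Pre_solution (commands : List String) : Prop :=
  ∀ c ∈ commands, c = "L" ∨ c = "R" ∨ c = "U" ∨ c = "D"
instance (commands : List String) : Decidable (Pre_solution commands) := by
  unfold Pre_solution; infer_instance
def pvWitness_solution : List String := (["R", "U", "L", "L", "D"])

def Spec_solution (commands : List String) (out : List Int) : Prop := out = solution_alt commands
instance (commands : List String) (out : List Int) : Decidable (Spec_solution commands out) := by unfold Spec_solution; infer_instance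

-- ===== CLAIM (what is proved, stated in full; the proofs are below) =====
def Claim_equal_solution : Prop := ∀ (commands : List String), Dom_solution commands → Pre_solution commands → Spec_solution commands (solution commands)

-- ===== LEMMAS AND PROOFS =====

-- loop invariant: A's fold adds the count-based displacement to any start accumulator
theorem solution_fold_eq (commands : List String) (acc : Int × Int)
    (h : Pre_solution commands) :
    commands.foldl
      (fun (answer : Int × Int) command =>
        let w := PySem.Dict.getD waysA command (0, 0)
        (answer.1 + w.1, answer.2 + w.2)) acc =
    (acc.1 + (PySem.List.count commands "R" : Int) - (PySem.List.count commands "L" : Int),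
     acc.2 + (PySem.List.count commands "U" : Int) - (PySem.List.count commands "D" : Int)) := by
  induction commands generalizing acc with
  | nil => simp [PySem.List.count]
  | cons c cs ih =>
    have hc := h c (List.mem_cons_self)
    have hcs : Pre_solution cs := fun x hx => h x (List.mem_cons_of_mem _ hx)
    rcases hc with h1 | h1 | h1 | h1 <;> subst h1 <;>
      simp only [List.foldl_cons, ih _ hcs, PySem.List.count, List.count_cons] <;>
      simp [show waysA.getD "L" (0, 0) = (-1, 0) from by decide,
            show waysA.getD "R" (0, 0) = (1, 0) from by decide,
            show waysA.getD "U" (0, 0) = (0, 1) from by decide,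
            show waysA.getD "D" (0, 0) = (0, -1) from by decide, Prod.ext_iff] <;>
      ring

-- B's recursion computes the same count-based closed form
theorem solution_alt_eq (commands : List String) (h : Pre_solution commands) :
    solution_alt commands =
    [(PySem.List.count commands "R" : Int) - (PySem.List.count commands "L" : Int),
     (PySem.List.count commands "U" : Int) - (PySem.List.count commands "D" : Int)] := by
  induction commands using solution_alt.induct with
  | case1 => simp [solution_alt, PySem.List.count]
  | case2 commands h0 h1 =>
    obtain ⟨c, rfl⟩ : ∃ c, commands = [c] := by
      match commands, h1 with
      | [c], _ => exact ⟨c, rfl⟩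
    rcases h c List.mem_cons_self with rfl | rfl | rfl | rfl <;>
      simp [solution_alt, PySem.List.count, PySem.List.pyGetD, PySem.List.pyGet?,
            PySem.List.pyIdx?] <;> decide
  | case3 commands h0 h1 mid ihL ihR =>
    have hsub : ∀ (a : Option Int) (b : Option Int),
        Pre_solution (PySem.List.slice commands a b) := by
      intro a b c hc
      exact h c (PySem.List.mem_of_mem_slice commands a b hc)
    rw [solution_alt]
    simp only [h0, h1, dif_neg, not_false_iff]
    rw [ihL (hsub _ _), ihR (hsub _ _)]
    simp only [PySem.List.slice_to_natCast, PySem.List.slice_from_natCast,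
               PySem.List.pyGetD, PySem.List.pyGet?, PySem.List.pyIdx?]
    norm_num
    have hc : ∀ v : String, List.count v commands =
        List.count v (commands.take mid) + List.count v (commands.drop mid) := by
      intro v
      conv_lhs => rw [← List.take_append_drop mid commands]
      rw [List.count_append]
    rw [hc "R", hc "L", hc "U", hc "D"]
    push_cast
    constructor <;> ring

-- ===== VERDICT (by name: the statement is the Claim_ definition above) =====
theorem solution_spec : Claim_equal_solution := by
  intro commands _ hpre
  unfold Spec_solution solution
  simp [solution_fold_eq commands (0, 0) hpre, solution_alt_eq commands hpre]
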